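-- pv_equiv track=rewrite | github.com/muktadiranik/Tutorial-Python | 16_3_recursion_1.py | move_all_to_end
-- ===== SOURCE A (Python) =====
-- def move_all_to_end(string, x):
--     if len(string) == 0:
--         return ""
--     ch = string[0]
--     rest_s = move_all_to_end(string[1:], x)
--     if ch == x:
--         return rest_s + ch
--     return ch + rest_s
-- ===== SOURCE B (Python) =====
-- def move_all_to_end(string, x):
--     kept = []
--     count = 0
--     for ch in string:
--         if ch == x:
--             count += 1
--         else:
--             kept.append(ch)
--     return ''.join(kept) + x * count
-- ===== Notes on version B (the rewrite author's own statement) =====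
-- stated objective: faster
-- what changed: Replaces A's O(n^2) recursion (string slicing and concatenation at every level) with a single iterative pass that accumulates non-matching characters in a list and counts matches, then joins once and appends x*count.
import Mathlib
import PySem

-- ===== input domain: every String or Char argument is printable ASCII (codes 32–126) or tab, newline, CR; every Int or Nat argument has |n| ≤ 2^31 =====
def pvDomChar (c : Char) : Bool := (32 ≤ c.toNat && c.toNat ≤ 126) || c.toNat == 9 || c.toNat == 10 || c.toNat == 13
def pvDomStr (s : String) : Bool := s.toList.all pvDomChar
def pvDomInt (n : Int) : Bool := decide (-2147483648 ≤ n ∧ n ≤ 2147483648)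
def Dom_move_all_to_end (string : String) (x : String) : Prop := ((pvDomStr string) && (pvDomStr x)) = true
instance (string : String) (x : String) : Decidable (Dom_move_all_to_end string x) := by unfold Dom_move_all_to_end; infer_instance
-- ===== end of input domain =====

-- B replaces A's recursion (slice + concatenate at every level) with one iterative pass
-- (keep non-matching chars, count matches, append x*count once); objective: faster.

-- ===== PORT A =====
-- A's recursion over the string, on its character list; string[0] is the 1-char string [c],
-- string[1:] is the tail, '+' is list append.
def moveAllGoA (x : List Char) : List Char → List Char
  | [] => []
  | c :: rest =>
    let restS := moveAllGoA x rest
    if [c] == x then restS ++ [c] else [c] ++ restS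

def move_all_to_end (string : String) (x : String) : String :=
  String.ofList (moveAllGoA x.toList string.toList)

-- ===== PORT B =====
-- B's loop: fold over the characters carrying (kept, count); then ''.join(kept) + x*count.
def move_all_to_end_alt (string : String) (x : String) : String :=
  let st := string.toList.foldl
    (fun (p : List Char × Nat) c =>
      if [c] == x.toList then (p.1, p.2 + 1) else (p.1 ++ [c], p.2))
    ([], 0)
  String.ofList (st.1 ++ (List.replicate st.2 x.toList).flatten)

-- ===== PRECONDITION & SPEC =====
def Spec_move_all_to_end (string : String) (x : String) (out : String) : Prop := out = move_all_to_end_alt string x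
instance (string : String) (x : String) (out : String) : Decidable (Spec_move_all_to_end string x out) := by unfold Spec_move_all_to_end; infer_instance

-- ===== CLAIM (what is proved, stated in full; the proofs are below) =====
def Claim_equal_move_all_to_end : Prop := ∀ (string : String) (x : String), Dom_move_all_to_end string x → Spec_move_all_to_end string x (move_all_to_end string x)

-- ===== LEMMAS AND PROOFS =====

theorem moveAllGoA_eq (x : List Char) (l : List Char) :
    moveAllGoA x l =
      l.filter (fun c => !([c] == x)) ++
        (List.replicate (l.countP (fun c => [c] == x)) x).flatten := by
  induction l with
  | nil => simp [moveAllGoA]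
  | cons c rest ih =>
    by_cases h : ([c] == x) = true
    · have hx : [c] = x := by simpa using h
      simp [moveAllGoA, ih, List.replicate_succ',
        hx]
    · simp [moveAllGoA, h, ih]

theorem moveAllFold_eq (x : List Char) (l : List Char) (acc : List Char) (n : Nat) :
    l.foldl
      (fun (p : List Char × Nat) c =>
        if [c] == x then (p.1, p.2 + 1) else (p.1 ++ [c], p.2))
      (acc, n)
    = (acc ++ l.filter (fun c => !([c] == x)), n + l.countP (fun c => [c] == x)) := by
  induction l generalizing acc n with
  | nil => simp
  | cons c rest ih =>
    simp only [List.foldl_cons]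
    by_cases h : ([c] == x) = true
    · rw [if_pos h, ih]
      simp [h]
      omega
    · rw [if_neg h, ih]
      simp [h]

-- ===== VERDICT (by name: the statement is the Claim_ definition above) =====
theorem move_all_to_end_spec : Claim_equal_move_all_to_end := by
  intro s x _
  unfold Spec_move_all_to_end move_all_to_end move_all_to_end_alt
  rw [moveAllFold_eq, moveAllGoA_eq]
  simp
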